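-- pv_equiv track=rewrite | github.com/paulfitz/sheetsite | sheetsite/destination/stone_soup.py | get_props
-- ===== SOURCE A (Python) =====
-- def get_prop(key,rows):
--     val = None
--     many_versions = False
--     for row in rows:
--         v = row[key]
--         if v != None:
--             if val == None:
--                 val = v
--             if v != val:
--                 many_versions = True
--     return val, many_versions
--
-- def get_props(keys,rows,first):
--     result = {}
--     for key in keys:
--         val, many_versions = get_prop(key,rows)
--         if many_versions and not(first):
--             val = None
--         result[key] = val
--     return result
-- ===== SOURCE B (Python) =====
-- def get_props(keys, rows, first):
--     # One row-major pass over the data instead of one full scan of rows per key.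
--     state = {}
--     for key in keys:
--         state[key] = (None, False)
--     for row in rows:
--         for key in state:
--             v = row[key]
--             val, many_versions = state[key]
--             if v != None:
--                 if val == None:
--                     val = v
--                 if v != val:
--                     many_versions = True
--             state[key] = (val, many_versions)
--     return {key: (None if many_versions and not first else val)
--             for key, (val, many_versions) in state.items()}
-- ===== Notes on version B (the rewrite author's own statement) =====
-- stated objective: alternative
-- what changed: Replaces the per-key helper that rescans all rows (key-major nested loops with a separate get_prop pass per key) by a single row-major sweep that maintains one (val, many_versions) accumulator per key in a dict and post-processes it into the result.
import Mathlib
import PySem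

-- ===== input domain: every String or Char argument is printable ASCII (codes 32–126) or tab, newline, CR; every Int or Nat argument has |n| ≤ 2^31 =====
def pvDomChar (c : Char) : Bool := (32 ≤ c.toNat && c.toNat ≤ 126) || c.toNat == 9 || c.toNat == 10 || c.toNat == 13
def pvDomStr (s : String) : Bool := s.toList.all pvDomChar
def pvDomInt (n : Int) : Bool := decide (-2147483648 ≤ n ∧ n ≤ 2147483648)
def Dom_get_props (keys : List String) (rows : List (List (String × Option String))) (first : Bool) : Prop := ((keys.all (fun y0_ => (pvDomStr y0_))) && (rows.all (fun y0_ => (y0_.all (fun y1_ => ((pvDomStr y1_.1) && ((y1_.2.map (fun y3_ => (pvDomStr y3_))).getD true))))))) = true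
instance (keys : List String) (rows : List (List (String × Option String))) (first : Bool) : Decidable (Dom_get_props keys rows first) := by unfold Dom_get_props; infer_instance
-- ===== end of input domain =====

-- B replaces A's per-key rescan of all rows by a single row-major sweep keeping one
-- (val, many_versions) accumulator per key in a dict; same cost, different traversal.


-- shared helpers (both Pythons contain these very statements):
-- `row[key]` on a dict-as-association-list: first match; `none` = Python's KeyError (excluded by Pre_)
def pvRowGet (row : List (String × Option String)) (key : String) : Option (Option String) :=
  (row.find? (fun p => p.1 == key)).map (fun p => p.2)

-- the common per-value update: `if v != None: if val == None: val = v; if v != val: many = True`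
def pvStep (st : Option String × Bool) (v : Option String) : Option String × Bool :=
  if v ≠ none then
    let val := if st.1 = none then v else st.1
    (val, if v ≠ val then true else st.2)
  else st

-- ===== PORT A =====
def get_prop (key : String) (rows : List (List (String × Option String))) :
    Option String × Bool :=
  rows.foldl (fun st row =>
    match pvRowGet row key with
    | none => st          -- Python raises KeyError here; such inputs are outside Pre_
    | some v => pvStep st v) (none, false)

def get_props (keys : List String) (rows : List (List (String × Option String))) (first : Bool) : List (String × Option String) :=
  (keys.foldl (fun result key =>
      let p := get_prop key rows
      result.insert key (if p.2 && !first then none else p.1))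
    (PySem.Dict.empty : PySem.Dict String (Option String))).items

-- ===== PORT B =====
def get_props_alt (keys : List String) (rows : List (List (String × Option String))) (first : Bool) : List (String × Option String) :=
  let state0 : PySem.Dict String (Option String × Bool) :=
    keys.foldl (fun d key => d.insert key ((none : Option String), false)) PySem.Dict.empty
  let state := rows.foldl (fun d row =>
    d.keys.foldl (fun d' key =>
      match pvRowGet row key with
      | none => d'        -- Python raises KeyError here; such inputs are outside Pre_
      | some v => d'.insert key (pvStep (d'.getD key (none, false)) v)) d) state0
  state.items.map (fun p => (p.1, if p.2.2 && !first then none else p.2.1))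

-- ===== PRECONDITION & SPEC =====
-- Pre_ excludes exactly the inputs where some listed key is missing from some row:
-- there the Python A raises KeyError (and so does B).
def Pre_get_props (keys : List String) (rows : List (List (String × Option String))) (first : Bool) : Prop :=
  ∀ k ∈ keys, ∀ row ∈ rows, (pvRowGet row k).isSome
instance (keys : List String) (rows : List (List (String × Option String))) (first : Bool) : Decidable (Pre_get_props keys rows first) := by unfold Pre_get_props; infer_instance

def pvWitness_get_props : List String × (List (List (String × Option String))) × Bool :=
  (["a", "b"], [[("a", some "x"), ("b", none)], [("a", some "y"), ("b", some "z")]], false)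

def Spec_get_props (keys : List String) (rows : List (List (String × Option String))) (first : Bool) (out : List (String × Option String)) : Prop := out = get_props_alt keys rows first
instance (keys : List String) (rows : List (List (String × Option String))) (first : Bool) (out : List (String × Option String)) : Decidable (Spec_get_props keys rows first out) := by unfold Spec_get_props; infer_instance

-- ===== CLAIM (what is proved, stated in full; the proofs are below) =====
def Claim_equal_get_props : Prop := ∀ (keys : List String) (rows : List (List (String × Option String))) (first : Bool), Dom_get_props keys rows first → Pre_get_props keys rows first → Spec_get_props keys rows first (get_props keys rows first)

-- ===== LEMMAS AND PROOFS =====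

-- A row's effect on one key's accumulator (the body of A's loop, point of comparison)
def pvStepRow (st : Option String × Bool) (row : List (String × Option String)) (key : String) :
    Option String × Bool :=
  match pvRowGet row key with
  | none => st
  | some v => pvStep st v

theorem get_prop_eq (key : String) (rows : List (List (String × Option String))) :
    get_prop key rows = rows.foldl (fun st row => pvStepRow st row key) (none, false) := rfl

-- generic: folding `insert k (f k)` over a key list, looked up afterwards
theorem foldl_insert_keyfn_getD {ν : Type} (f : String → ν) (dflt : ν) :
    ∀ (ks : List String) (d : PySem.Dict String ν) (k' : String),
      (ks.foldl (fun r k => r.insert k (f k)) d).getD k' dflt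
        = if k' ∈ ks then f k' else d.getD k' dflt := by
  intro ks
  induction ks with
  | nil => intro d k'; simp
  | cons a t ih =>
    intro d k'
    simp only [List.foldl_cons, ih, List.mem_cons]
    by_cases ht : k' ∈ t
    · simp [ht]
    · by_cases ha : k' = a
      · simp [ha, PySem.Dict.getD_insert_self]
      · simp [ht, ha, PySem.Dict.getD_insert_of_ne _ _ _ ha]

-- B's inner (per-row) fold: keys are unchanged when every processed key is present
theorem inner_keys (row : List (String × Option String)) :
    ∀ (l : List String) (d : PySem.Dict String (Option String × Bool)),
      (∀ k ∈ l, k ∈ d.keys) →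
      ((l.foldl (fun d' key =>
          match pvRowGet row key with
          | none => d'
          | some v => d'.insert key (pvStep (d'.getD key (none, false)) v)) d).keys = d.keys) := by
  intro l
  induction l with
  | nil => intro d _; simp
  | cons a t ih =>
    intro d hmem
    have ha : a ∈ d.keys := hmem a (by simp)
    have hkeys : ∀ (x : PySem.Dict String (Option String × Bool)),
        x.keys = d.keys →
        ((match pvRowGet row a with
          | none => d
          | some v => d.insert a (pvStep (d.getD a (none, false)) v)) : PySem.Dict String (Option String × Bool)).keys = d.keys := by
      intro x _
      cases pvRowGet row a with
      | none => rfl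
      | some v =>
        simp only []
        exact PySem.Dict.keys_insert_of_contains _ _
          ((PySem.Dict.contains_iff_mem_keys _ _).mpr ha)
    have hstep := hkeys d rfl
    simp only [List.foldl_cons]
    rw [ih _ (fun k hk => by rw [hstep]; exact hmem k (by simp [hk])), hstep]

-- B's inner fold, looked up at one key
theorem inner_getD (row : List (String × Option String)) :
    ∀ (l : List String) (d : PySem.Dict String (Option String × Bool)) (k' : String),
      l.Nodup →
      ((l.foldl (fun d' key =>
          match pvRowGet row key with
          | none => d'
          | some v => d'.insert key (pvStep (d'.getD key (none, false)) v)) d).getD k' (none, false)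
        = if k' ∈ l then pvStepRow (d.getD k' (none, false)) row k'
          else d.getD k' (none, false)) := by
  intro l
  induction l with
  | nil => intro d k' _; simp
  | cons a t ih =>
    intro d k' hnd
    obtain ⟨hat, hnt⟩ := List.nodup_cons.mp hnd
    rw [List.foldl_cons, ih _ k' hnt]
    by_cases ht : k' ∈ t
    · have hka : k' ≠ a := fun e => hat (e ▸ ht)
      cases h : pvRowGet row a <;>
        simp [ht, PySem.Dict.getD_insert_of_ne _ _ _ hka]
    · by_cases hka : k' = a
      · subst hka
        cases h : pvRowGet row k' <;>
          simp [ht, h, pvStepRow, PySem.Dict.getD_insert_self]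
      · cases h : pvRowGet row a <;>
          simp [ht, hka, PySem.Dict.getD_insert_of_ne _ _ _ hka]

-- B's outer (over rows) fold: keys unchanged
theorem outer_keys :
    ∀ (rows : List (List (String × Option String)))
      (d : PySem.Dict String (Option String × Bool)),
      ((rows.foldl (fun d row =>
          d.keys.foldl (fun d' key =>
            match pvRowGet row key with
            | none => d'
            | some v => d'.insert key (pvStep (d'.getD key (none, false)) v)) d) d).keys = d.keys) := by
  intro rows
  induction rows with
  | nil => intro d; rfl
  | cons row rs ih =>
    intro d
    simp only [List.foldl_cons]
    rw [ih, inner_keys row d.keys d (fun _ h => h)]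

-- B's outer fold, looked up at one key: exactly A's per-key scan of the rows
theorem outer_getD (k' : String) :
    ∀ (rows : List (List (String × Option String)))
      (d : PySem.Dict String (Option String × Bool)),
      d.keys.Nodup →
      ((rows.foldl (fun d row =>
          d.keys.foldl (fun d' key =>
            match pvRowGet row key with
            | none => d'
            | some v => d'.insert key (pvStep (d'.getD key (none, false)) v)) d) d).getD k' (none, false)
        = if k' ∈ d.keys then rows.foldl (fun st row => pvStepRow st row k') (d.getD k' (none, false))
          else d.getD k' (none, false)) := by
  intro rows
  induction rows with
  | nil =>
    intro d _
    by_cases h : k' ∈ d.keys <;> simp [h]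
  | cons row rs ih =>
    intro d hnd
    have hk := inner_keys row d.keys d (fun _ h => h)
    have hnd1 : (d.keys.foldl (fun d' key =>
        match pvRowGet row key with
        | none => d'
        | some v => d'.insert key (pvStep (d'.getD key (none, false)) v)) d).keys.Nodup := by
      rw [hk]; exact hnd
    rw [List.foldl_cons, ih _ hnd1, hk, inner_getD row d.keys d k' hnd]
    by_cases h : k' ∈ d.keys <;> simp [h]

-- ===== VERDICT (by name: the statement is the Claim_ definition above) =====
theorem get_props_spec : Claim_equal_get_props := by
  intro keys rows first _ _
  unfold Spec_get_props
  have hA : get_props keys rows first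
      = (keys.foldl (fun r k => r.insert k
          (if (get_prop k rows).2 && !first then none else (get_prop k rows).1))
          (PySem.Dict.empty : PySem.Dict String (Option String))).items := rfl
  have hB : get_props_alt keys rows first
      = ((rows.foldl (fun d row =>
            d.keys.foldl (fun d' key =>
              match pvRowGet row key with
              | none => d'
              | some v => d'.insert key (pvStep (d'.getD key (none, false)) v)) d)
          (keys.foldl (fun d key => d.insert key ((none : Option String), false))
            PySem.Dict.empty)).items.map
          (fun p => (p.1, if p.2.2 && !first then none else p.2.1))) := rfl
  rw [hA, hB]
  -- keys of both dicts are the distinct keys, in first-occurrence order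
  have hAkeys : (keys.foldl (fun r k => r.insert k
      (if (get_prop k rows).2 && !first then none else (get_prop k rows).1))
      (PySem.Dict.empty : PySem.Dict String (Option String))).keys = PySem.Set.ofList keys := by
    rw [PySem.Dict.keys_foldl_insert, PySem.Dict.keys_empty, PySem.Set.update_nil_left]
  have hAnodup : (keys.foldl (fun r k => r.insert k
      (if (get_prop k rows).2 && !first then none else (get_prop k rows).1))
      (PySem.Dict.empty : PySem.Dict String (Option String))).keys.Nodup := by
    exact PySem.Dict.nodup_keys_foldl_insert _ _ _ (by simp [PySem.Dict.keys_empty])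
  have h0keys : (keys.foldl (fun d key => d.insert key ((none : Option String), false))
      (PySem.Dict.empty : PySem.Dict String (Option String × Bool))).keys = PySem.Set.ofList keys := by
    rw [PySem.Dict.keys_foldl_insert, PySem.Dict.keys_empty, PySem.Set.update_nil_left]
  have h0nodup : (keys.foldl (fun d key => d.insert key ((none : Option String), false))
      (PySem.Dict.empty : PySem.Dict String (Option String × Bool))).keys.Nodup := by
    exact PySem.Dict.nodup_keys_foldl_insert _ _ _ (by simp [PySem.Dict.keys_empty])
  have hBkeys := outer_keys rows (keys.foldl (fun d key => d.insert key ((none : Option String), false)) PySem.Dict.empty)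
  rw [PySem.Dict.items_eq_map_keys _ hAnodup none, hAkeys,
      PySem.Dict.items_eq_map_keys _ (hBkeys ▸ h0nodup) ((none : Option String), false),
      hBkeys, h0keys, List.map_map]
  apply List.map_congr_left
  intro k hk
  have hk' : k ∈ keys := (PySem.Set.mem_ofList keys k).mp hk
  dsimp only [Function.comp]
  rw [foldl_insert_keyfn_getD]
  simp only [outer_getD k rows _ h0nodup, h0keys, foldl_insert_keyfn_getD]
  simp [hk, hk', get_prop_eq]
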